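-- pv_equiv track=rewrite | github.com/kalyaniuniversity/MC4 | MC4/algorithm.py | calculate_aggregated_ranks
-- ===== SOURCE A (Python) =====
-- def calculate_aggregated_ranks(matrix):
--
--     a = {}
--     rank = 1
--
--     for num in sorted(matrix, reverse = True):
--         if num not in a:
--             a[num] = rank
--             rank = rank+1
--
--     final_ranks = [a[i] for i in matrix]
--
--     return final_ranks
-- ===== SOURCE B (Python) =====
-- def calculate_aggregated_ranks(matrix):
--     # Dense descending rank: 1 + number of DISTINCT values strictly greater than x,
--     # found by binary-searching x in the ascending sorted distinct values.
--     u = sorted(set(matrix))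
--     n = len(u)
--     result = []
--     for x in matrix:
--         lo, hi = 0, n
--         while lo < hi:           # bisect_left by hand (no imports in this module)
--             mid = (lo + hi) // 2
--             if u[mid] < x:
--                 lo = mid + 1
--             else:
--                 hi = mid
--         result.append(n - lo)    # = count of distinct values >= x = 1 + count of distinct > x
--     return result
-- ===== Notes on version B (the rewrite author's own statement) =====
-- stated objective: alternative
-- what changed: Replaces A's incremental rank dictionary built over the descending sort with an ascending sorted distinct array plus a hand-written binary search: each rank is computed positionally as len(distinct) - bisect_left(distinct, x), so no rank dictionary and no per-element counter exist.
import Mathlib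
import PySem

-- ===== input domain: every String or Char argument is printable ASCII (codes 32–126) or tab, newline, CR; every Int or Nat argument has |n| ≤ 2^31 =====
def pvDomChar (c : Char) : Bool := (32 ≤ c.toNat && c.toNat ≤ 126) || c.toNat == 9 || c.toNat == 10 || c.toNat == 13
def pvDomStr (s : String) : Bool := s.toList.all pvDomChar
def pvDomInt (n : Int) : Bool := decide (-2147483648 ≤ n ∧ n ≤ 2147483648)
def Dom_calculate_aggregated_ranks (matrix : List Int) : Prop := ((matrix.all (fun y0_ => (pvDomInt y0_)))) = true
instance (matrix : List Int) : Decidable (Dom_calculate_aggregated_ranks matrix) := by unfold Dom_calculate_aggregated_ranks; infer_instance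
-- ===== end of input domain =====

-- B computes each rank as (number of distinct values) - bisect_left position of x in the ascending
-- sorted distinct values (= 1 + number of distinct strictly greater values): no rank dictionary,
-- a hand-written binary search instead of A's incremental counter; objective: alternative.

-- ===== PORT A =====
-- loop body of A's 'for num in sorted(matrix, reverse=True)' over the state (a, rank)
def pvStepA (p : PySem.Dict Int Int × Int) (num : Int) : PySem.Dict Int Int × Int :=
  if p.1.contains num then p else (p.1.insert num p.2, p.2 + 1)

def calculate_aggregated_ranks (matrix : List Int) : List Int :=
  let st := (PySem.List.sorted matrix (fun x => x) true).foldl pvStepA (PySem.Dict.empty, 1)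
  -- a[i]: the key i is always present (every element of matrix was inserted), so no KeyError; .getD 0 is never the default
  matrix.map (fun i => (st.1.get? i).getD 0)

-- ===== PORT B =====
-- B's hand-written bisect_left loop on the ascending sorted distinct values
def pvBisect (u : List Int) (x : Int) (lo hi : Int) : Int :=
  if _h : lo < hi then
    let mid := PySem.Int.floordiv (lo + hi) 2
    -- u[mid]: 0 ≤ lo ≤ mid < hi ≤ len(u) throughout, so the index is in range and no IndexError occurs
    if PySem.List.pyGetD u mid 0 < x then pvBisect u x (mid + 1) hi
    else pvBisect u x lo mid
  else lo
termination_by (hi - lo).toNat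
decreasing_by
  · have h1 := (PySem.Int.le_floordiv_iff_mul_le (a := lo + hi) (b := 2) (q := lo) (by norm_num)).mpr (by omega)
    omega
  · have h2 := (PySem.Int.floordiv_lt_iff_lt_mul (a := lo + hi) (b := 2) (q := hi) (by norm_num)).mpr (by omega)
    omega

def calculate_aggregated_ranks_alt (matrix : List Int) : List Int :=
  let u := PySem.List.sorted (PySem.Set.ofList matrix) (fun v => v) false
  let n : Int := (u.length : Int)
  matrix.foldl (fun result x => result ++ [n - pvBisect u x 0 n]) []

-- ===== PRECONDITION & SPEC =====
def Spec_calculate_aggregated_ranks (matrix : List Int) (out : List Int) : Prop := out = calculate_aggregated_ranks_alt matrix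
instance (matrix : List Int) (out : List Int) : Decidable (Spec_calculate_aggregated_ranks matrix out) := by unfold Spec_calculate_aggregated_ranks; infer_instance

-- ===== CLAIM (what is proved, stated in full; the proofs are below) =====
def Claim_equal_calculate_aggregated_ranks : Prop := ∀ (matrix : List Int), Dom_calculate_aggregated_ranks matrix → Spec_calculate_aggregated_ranks matrix (calculate_aggregated_ranks matrix)

-- ===== LEMMAS AND PROOFS =====

-- keys already in the dict keep their value through the rest of A's loop
lemma pvFrameA (L : List Int) (d : PySem.Dict Int Int) (r : Int) (k : Int)
    (hk : k ∈ d.keys) : (L.foldl pvStepA (d, r)).1.get? k = d.get? k := by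
  induction L generalizing d r with
  | nil => rfl
  | cons y t ih =>
    simp only [List.foldl_cons, pvStepA]
    by_cases hc : d.contains y = true
    · simpa [hc] using ih d r hk
    · have hy : y ∉ d.keys := fun h => hc ((PySem.Dict.contains_iff_mem_keys d y).mpr h)
      have hne : k ≠ y := fun h => hy (h ▸ hk)
      simp only [hc]
      rw [if_neg (by simp)]
      rw [ih (d.insert y r) (r + 1) ((PySem.Dict.mem_keys_insert d y k r).mpr (Or.inr hk))]
      exact PySem.Dict.get?_insert_of_ne d r hne

-- dropping an element the predicate rejects does not change the count
lemma pvCountDiscard (s : List Int) (x : Int) (p : Int → Bool) (hp : p x = false) :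
    (PySem.Set.discard s x).countP p = s.countP p := by
  simp only [PySem.Set.discard, List.countP_filter]
  exact List.countP_congr (fun a _ => by by_cases h : a = x <;> simp [h, hp])

-- invariant of A's loop: a value x of L not yet in the dict ends with rank
-- r + (number of distinct values of L greater than x and not already keys)
lemma pvLoopA (L : List Int) (d : PySem.Dict Int Int) (r : Int) (x : Int)
    (hs : L.Pairwise (fun a b => b ≤ a)) (hx : x ∈ L) (hxd : d.contains x = false) :
    (L.foldl pvStepA (d, r)).1.get? x =
      some (r + ((PySem.Set.ofList L).countP (fun v => decide (x < v) && !(d.contains v)) : Int)) := by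
  induction L generalizing d r with
  | nil => cases hx
  | cons y t ih =>
    have hhead : ∀ v ∈ t, v ≤ y := (List.pairwise_cons.mp hs).1
    have hst : t.Pairwise (fun a b => b ≤ a) := (List.pairwise_cons.mp hs).2
    simp only [List.foldl_cons, pvStepA]
    by_cases hc : d.contains y = true
    · have hxy : x ≠ y := fun h => by rw [h, hc] at hxd; cases hxd
      have hxt : x ∈ t := (List.mem_cons.mp hx).resolve_left hxy
      simp only [hc, if_true]
      rw [ih d r hst hxt hxd]
      rw [PySem.Set.ofList_cons, List.countP_cons, pvCountDiscard _ _ _ (by simp [hc])]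
      simp [hc]
    · simp only [hc]
      rw [if_neg (by simp)]
      by_cases hxy : x = y
      · subst hxy
        rw [pvFrameA t (d.insert x r) (r + 1) x
              ((PySem.Dict.mem_keys_insert d x x r).mpr (Or.inl rfl))]
        rw [PySem.Dict.get?_insert_self]
        have h0 : (PySem.Set.ofList (x :: t)).countP
            (fun v => decide (x < v) && !(d.contains v)) = 0 := by
          rw [List.countP_eq_zero]
          intro a ha
          have ha' : a ∈ x :: t := (PySem.Set.mem_ofList _ _).mp ha
          have hax : a ≤ x := by
            rcases List.mem_cons.mp ha' with h | h
            · exact le_of_eq h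
            · exact hhead a h
          simp [not_lt.mpr hax]
        rw [h0]
        simp
      · have hxt : x ∈ t := (List.mem_cons.mp hx).resolve_left hxy
        have hx' : (d.insert y r).contains x = false := by
          rw [PySem.Dict.contains_insert]
          simp [hxy, hxd]
        rw [ih (d.insert y r) (r + 1) hst hxt hx']
        have hxley : x < y := lt_of_le_of_ne (hhead x hxt) hxy
        rw [PySem.Set.ofList_cons, List.countP_cons]
        have hpred : ((PySem.Set.ofList t).discard y).countP
              (fun v => decide (x < v) && !(d.contains v)) =
            (PySem.Set.ofList t).countP
              (fun v => decide (x < v) && !((d.insert y r).contains v)) := by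
          simp only [PySem.Set.discard, List.countP_filter]
          refine List.countP_congr (fun a _ => ?_)
          by_cases h1 : x < a <;> by_cases h2 : a = y <;> by_cases h3 : d.contains a <;>
            simp [h1, h2, h3, PySem.Dict.contains_insert, hc]
        rw [hpred]
        have hpy : (decide (x < y) && !(d.contains y)) = true := by simp [hxley, hc]
        rw [hpy]
        simp only [ite_true]
        congr 1
        push_cast
        ring

-- binary-search invariant: with everything below lo already < x and everything from hi on ≥ x,
-- B's loop returns the position splitting u at x
lemma pvBisect_spec (u : List Int) (x : Int) (hs : u.Pairwise (· ≤ ·)) :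
    ∀ (k : Nat) (lo hi : Int), (hi - lo).toNat ≤ k → 0 ≤ lo → lo ≤ hi → hi ≤ (u.length : Int) →
    (∀ i : Nat, (h : i < u.length) → (i : Int) < lo → u[i] < x) →
    (∀ i : Nat, (h : i < u.length) → hi ≤ (i : Int) → ¬ u[i] < x) →
    0 ≤ pvBisect u x lo hi ∧ pvBisect u x lo hi ≤ (u.length : Int) ∧
      (∀ i : Nat, (h : i < u.length) → ((i : Int) < pvBisect u x lo hi ↔ u[i] < x)) := by
  intro k
  induction k with
  | zero =>
    intro lo hi hk h0 hlh hhl hlow hhigh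
    rw [pvBisect, dif_neg (by omega)]
    refine ⟨h0, by omega, fun i h => ⟨hlow i h, fun hu => ?_⟩⟩
    by_contra hge
    exact hhigh i h (by omega) hu
  | succ k ih =>
    intro lo hi hk h0 hlh hhl hlow hhigh
    by_cases hlt : lo < hi
    · rw [pvBisect, dif_pos hlt]
      have hm1 := (PySem.Int.le_floordiv_iff_mul_le (a := lo + hi) (b := 2) (q := lo) (by norm_num)).mpr (by omega)
      have hm2 := (PySem.Int.floordiv_lt_iff_lt_mul (a := lo + hi) (b := 2) (q := hi) (by norm_num)).mpr (by omega)
      set mid := PySem.Int.floordiv (lo + hi) 2 with hmid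
      have hmlen : mid < (u.length : Int) := by omega
      have hget : PySem.List.pyGetD u mid 0 = u[mid.toNat]'(by omega) :=
        PySem.List.pyGetD_eq_getElem u 0 (by omega) hmlen
      have hmono := List.pairwise_iff_getElem.mp hs
      by_cases hb : PySem.List.pyGetD u mid 0 < x
      · rw [if_pos hb]
        refine ih (mid + 1) hi (by omega) (by omega) (by omega) hhl ?_ hhigh
        intro i h hi'
        have hle' : u[i] ≤ u[mid.toNat]'(by omega) := by
          rcases Nat.lt_or_ge i mid.toNat with hc | hc
          · exact hmono i mid.toNat h (by omega) hc
          · have : i = mid.toNat := by omega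
            exact le_of_eq (by simp [this])
        rw [hget] at hb
        omega
      · rw [if_neg hb]
        refine ih lo mid (by omega) h0 (by omega) (by omega) hlow ?_
        intro i h hi'
        have hge' : u[mid.toNat]'(by omega) ≤ u[i] := by
          rcases Nat.lt_or_ge mid.toNat i with hc | hc
          · exact hmono mid.toNat i (by omega) h hc
          · have : i = mid.toNat := by omega
            exact le_of_eq (by simp [this])
        rw [hget] at hb
        omega
    · rw [pvBisect, dif_neg hlt]
      refine ⟨h0, by omega, fun i h => ⟨hlow i h, fun hu => ?_⟩⟩
      by_contra hge
      exact hhigh i h (by omega) hu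

-- a position m that splits u by the predicate p is the count of p
lemma pvCount_of_split (u : List Int) (p : Int → Bool) (m : Int) (h0 : 0 ≤ m)
    (hm : m ≤ (u.length : Int))
    (hiff : ∀ i : Nat, (h : i < u.length) → ((i : Int) < m ↔ p u[i] = true)) :
    (u.countP p : Int) = m := by
  have hsplit : u = u.take m.toNat ++ u.drop m.toNat := (List.take_append_drop _ u).symm
  have htake : (u.take m.toNat).countP p = m.toNat := by
    have hlen : (u.take m.toNat).length = m.toNat := by
      rw [List.length_take]; omega
    have hall : ∀ a ∈ u.take m.toNat, p a = true := by
      intro a ha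
      obtain ⟨i, hi, hae⟩ := List.mem_iff_getElem.mp ha
      have hi' : i < u.length := by rw [hlen] at hi; omega
      rw [← hae, List.getElem_take]
      exact (hiff i hi').mp (by rw [hlen] at hi; omega)
    rw [List.countP_eq_length.mpr hall, hlen]
  have hdrop : (u.drop m.toNat).countP p = 0 := by
    rw [List.countP_eq_zero]
    intro a ha
    obtain ⟨j, hj, hae⟩ := List.mem_iff_getElem.mp ha
    have hj' : m.toNat + j < u.length := by
      have := List.length_drop (l := u) (i := m.toNat); omega
    rw [← hae, List.getElem_drop]
    intro hpa
    have := (hiff (m.toNat + j) hj').mpr hpa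
    omega
  calc (u.countP p : Int) = ((u.take m.toNat ++ u.drop m.toNat).countP p : Int) := by rw [← hsplit]
    _ = m := by rw [List.countP_append, htake, hdrop]; omega

-- elements not below x are the elements above x plus the copies of x itself
lemma pvCountNotLt (l : List Int) (x : Int) :
    l.countP (fun v => !decide (v < x)) = l.countP (fun v => decide (x < v)) + l.count x := by
  induction l with
  | nil => simp
  | cons a t ih =>
    rw [List.count_cons, List.countP_cons, List.countP_cons, ih]
    by_cases h1 : a < x <;> simp [h1] <;> split_ifs <;> omega

-- ===== VERDICT (by name: the statement is the Claim_ definition above) =====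
theorem calculate_aggregated_ranks_spec : Claim_equal_calculate_aggregated_ranks := by
  intro matrix _
  unfold Spec_calculate_aggregated_ranks calculate_aggregated_ranks calculate_aggregated_ranks_alt
  simp only []
  rw [PySem.List.foldl_append_singleton_eq_map, List.nil_append]
  apply List.map_congr_left
  intro i hi
  have hi' : i ∈ PySem.List.sorted matrix (fun x => x) true :=
    (PySem.List.mem_sorted matrix (fun x => x) true i).mpr hi
  rw [pvLoopA _ (PySem.Dict.empty : PySem.Dict Int Int) 1 i (PySem.List.sorted_pairwise_rev matrix (fun x => x))
      hi' (PySem.Dict.contains_empty i)]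
  simp only [Option.getD_some]
  have hpred : ∀ s : List Int,
      s.countP (fun v => decide (i < v) && !((PySem.Dict.empty : PySem.Dict Int Int).contains v)) =
        s.countP (fun v => decide (i < v)) :=
    fun s => List.countP_congr (fun a _ => by simp [PySem.Dict.contains_empty])
  rw [hpred]
  have hperm : (PySem.Set.ofList (PySem.List.sorted matrix (fun x => x) true)).Perm
      (PySem.Set.ofList matrix) :=
    (List.perm_ext_iff_of_nodup (PySem.Set.nodup_ofList _) (PySem.Set.nodup_ofList _)).mpr
      (fun a => by simp [PySem.Set.mem_ofList, PySem.List.mem_sorted])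
  rw [hperm.countP_eq]
  -- B side: the bisect returns the count of distinct values < i; turn n - that into 1 + (count > i)
  set u := PySem.List.sorted (PySem.Set.ofList matrix) (fun v => v) false with hu
  have hlt : u.Pairwise (· < ·) := PySem.List.sorted_ofList_pairwise_lt matrix
  have hle : u.Pairwise (· ≤ ·) := hlt.imp le_of_lt
  have hb := pvBisect_spec u i hle ((u.length : Int) - 0).toNat 0 (u.length : Int)
      (by omega) (by omega) (by omega) (by omega)
      (fun j h hj => by omega) (fun j h hj => by simp at hj; omega)
  obtain ⟨hb0, hbl, hbm⟩ := hb
  have hcnt : (u.countP (fun v => decide (v < i)) : Int) = pvBisect u i 0 (u.length : Int) :=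
    pvCount_of_split u _ _ hb0 hbl (fun j h => by
      constructor
      · intro hp; simpa using (hbm j h).mp hp
      · intro hp; exact (hbm j h).mpr (by simpa using hp))
  have hup : u.Perm (PySem.Set.ofList matrix) := PySem.List.sorted_perm _ _ _
  have hnd : u.Nodup := (hup.nodup_iff).mpr (PySem.Set.nodup_ofList matrix)
  have hmem : i ∈ u := hup.mem_iff.mpr ((PySem.Set.mem_ofList matrix i).mpr hi)
  have hcnt1 : u.count i = 1 := List.count_eq_one_of_mem hnd hmem
  have hsplitlen := List.length_eq_countP_add_countP (fun v => decide (v < i)) (l := u)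
  have hnotlt : u.countP (fun v => !decide (v < i)) =
      u.countP (fun v => decide (i < v)) + u.count i := pvCountNotLt u i
  have hcompl : u.countP (fun a => decide ¬ (decide (a < i)) = true) =
      u.countP (fun v => !decide (v < i)) :=
    List.countP_congr (fun a _ => by by_cases h : a < i <;> simp [h])
  have hgt : u.countP (fun v => decide (i < v)) =
      (PySem.Set.ofList matrix).countP (fun v => decide (i < v)) := hup.countP_eq _
  rw [← hgt]
  omega
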